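-- pv_equiv track=rewrite | github.com/kutt27/python | 05_functions/chapter_10.py | process_batch_records
-- ===== SOURCE A (Python) =====
-- from typing import Optional, Tuple, Dict, List, Any, Union
--
-- def process_batch_records(records: List[Dict]) -> Tuple[List[Dict], List[Dict]]:
--     """
--     Processes batch, returns successes and failures separately.
--
--     Multiple collections return pattern for batch operations.
--
--     Args:
--         records: Records to process
--
--     Returns:
--         Tuple of (successful_records, failed_records)
--
--     Real-world use case: Batch processing, ETL pipelines.
--     """
--     successful = []
--     failed = []
--
--     for record in records:
--         # Simulate validation
--         if record.get("valid", False):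
--             successful.append(record)
--         else:
--             failed.append(record)
--
--     return (successful, failed)
-- ===== SOURCE B (Python) =====
-- from typing import Optional, Tuple, Dict, List, Any, Union
--
-- def process_batch_records(records: List[Dict]) -> Tuple[List[Dict], List[Dict]]:
--     """Stable-sort the batch by validity (valid records first), then split it
--     at the number of valid records; stability preserves each group's order."""
--     ordered = sorted(records, key=lambda r: not r.get("valid", False))
--     k = sum(1 for r in records if r.get("valid", False))
--     return (ordered[:k], ordered[k:])
-- ===== Notes on version B (the rewrite author's own statement) =====
-- stated objective: alternative
-- what changed: Replaces the single interleaved append loop by a stable sort on the validity key (valid records first) followed by splitting the sorted list at the count of valid records; sort stability guarantees the same per-group order.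
import Mathlib
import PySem

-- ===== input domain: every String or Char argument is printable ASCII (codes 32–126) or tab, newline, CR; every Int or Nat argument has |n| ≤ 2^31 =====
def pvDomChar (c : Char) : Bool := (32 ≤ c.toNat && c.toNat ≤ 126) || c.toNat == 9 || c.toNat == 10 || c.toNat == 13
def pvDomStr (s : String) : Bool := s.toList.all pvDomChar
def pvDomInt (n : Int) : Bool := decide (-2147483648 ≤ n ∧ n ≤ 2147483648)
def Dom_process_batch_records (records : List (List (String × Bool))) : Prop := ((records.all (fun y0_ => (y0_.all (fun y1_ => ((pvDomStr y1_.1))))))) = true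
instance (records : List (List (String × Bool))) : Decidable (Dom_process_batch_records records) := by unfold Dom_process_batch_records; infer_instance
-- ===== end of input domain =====

-- B replaces A's single interleaved partition loop by a stable sort on validity followed by a split at the valid count (alternative algorithm, same result by sort stability).


-- ===== PORT A =====
-- shared lookup: record.get("valid", False)
def pvGetValid (record : List (String × Bool)) : Bool :=
  (PySem.Dict.mk record).getD "valid" false

-- A: one loop appending each record to 'successful' or 'failed'
def process_batch_records (records : List (List (String × Bool))) : (List (List (String × Bool))) × (List (List (String × Bool))) :=
  records.foldl
    (fun st record =>
      if pvGetValid record then (st.1 ++ [record], st.2)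
      else (st.1, st.2 ++ [record]))
    ([], [])

-- ===== PORT B =====
-- B: stable sort with key 'not valid' (valid records first), count the valid
-- records, and split the sorted list there: ordered[:k], ordered[k:]
def process_batch_records_alt (records : List (List (String × Bool))) : (List (List (String × Bool))) × (List (List (String × Bool))) :=
  let ordered := PySem.List.sorted records (fun r => !pvGetValid r) false
  let k : Int := records.foldl (fun n r => if pvGetValid r then n + 1 else n) 0
  (PySem.List.slice ordered none (some k), PySem.List.slice ordered (some k) none)

-- ===== PRECONDITION & SPEC =====
def Spec_process_batch_records (records : List (List (String × Bool))) (out : (List (List (String × Bool))) × (List (List (String × Bool)))) : Prop := out = process_batch_records_alt records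
instance (records : List (List (String × Bool))) (out : (List (List (String × Bool))) × (List (List (String × Bool)))) : Decidable (Spec_process_batch_records records out) := by unfold Spec_process_batch_records; infer_instance

-- ===== CLAIM (what is proved, stated in full; the proofs are below) =====
def Claim_equal_process_batch_records : Prop := ∀ (records : List (List (String × Bool))), Dom_process_batch_records records → Spec_process_batch_records records (process_batch_records records)

-- ===== LEMMAS AND PROOFS =====

-- A's fold partitions into (filter valid, filter invalid)
theorem pv_fold_partition (records : List (List (String × Bool)))
    (acc : (List (List (String × Bool))) × (List (List (String × Bool)))) :
    records.foldl
      (fun st record =>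
        if pvGetValid record then (st.1 ++ [record], st.2)
        else (st.1, st.2 ++ [record])) acc
    = (acc.1 ++ records.filter (fun r => pvGetValid r),
       acc.2 ++ records.filter (fun r => !pvGetValid r)) := by
  induction records generalizing acc with
  | nil => simp
  | cons r rs ih =>
    by_cases h : pvGetValid r = true <;>
      simp [List.foldl_cons, h, ih]

-- inserting x before the first element y with 'before x y = true'
theorem pv_insertBy_mid {α : Type} (before : α → α → Bool) (x : α)
    (A B : List α) (hA : ∀ a ∈ A, before x a = false)
    (hB : ∀ b ∈ B, before x b = true) :
    PySem.List.insertBy before x (A ++ B) = A ++ x :: B := by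
  induction A with
  | nil =>
    cases B with
    | nil => simp [PySem.List.insertBy]
    | cons b bs => simp [PySem.List.insertBy, hB b (by simp)]
  | cons a as ih =>
    have ha : before x a = false := hA a (by simp)
    simp only [List.cons_append, PySem.List.insertBy, ha]
    simp [ih (fun y hy => hA y (by simp [hy]))]

-- the insertion-sort fold with a boolean key '!p' produces filter p ++ filter !p
theorem pv_sort_fold {α : Type} (p : α → Bool) (xs ys : List α) :
    xs.foldl
      (fun acc x => PySem.List.insertBy (fun a b => decide ((!p a) < (!p b))) x acc)
      (ys.filter p ++ ys.filter (fun r => !p r))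
    = (ys ++ xs).filter p ++ (ys ++ xs).filter (fun r => !p r) := by
  induction xs generalizing ys with
  | nil => simp
  | cons x xs ih =>
    by_cases hx : p x = true
    · have hins : PySem.List.insertBy (fun a b => decide ((!p a) < (!p b))) x
          (ys.filter p ++ ys.filter (fun r => !p r))
          = ys.filter p ++ x :: ys.filter (fun r => !p r) := by
        apply pv_insertBy_mid
        · intro a ha
          have : p a = true := by simpa using (List.mem_filter.mp ha).2
          simp [hx, this]
        · intro b hb
          have : p b = false := by simpa using (List.mem_filter.mp hb).2
          simp [hx, this]
      have heq : ys.filter p ++ x :: ys.filter (fun r => !p r)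
          = (ys ++ [x]).filter p ++ (ys ++ [x]).filter (fun r => !p r) := by
        simp [List.filter_append, hx]
      rw [List.foldl_cons, hins, heq, ih (ys ++ [x])]
      simp
    · have hx' : p x = false := by simpa using hx
      have hins : PySem.List.insertBy (fun a b => decide ((!p a) < (!p b))) x
          (ys.filter p ++ ys.filter (fun r => !p r))
          = (ys.filter p ++ ys.filter (fun r => !p r)) ++ [x] := by
        apply PySem.List.insertBy_of_forall_not_before
        intro y _
        simp [hx', Bool.lt_iff]
      have heq : (ys.filter p ++ ys.filter (fun r => !p r)) ++ [x]
          = (ys ++ [x]).filter p ++ (ys ++ [x]).filter (fun r => !p r) := by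
        simp [List.filter_append, hx']
      rw [List.foldl_cons, hins, heq, ih (ys ++ [x])]
      simp

-- stable sort by the boolean key '!p' is exactly filter p ++ filter !p
theorem pv_sorted_partition {α : Type} (p : α → Bool) (xs : List α) :
    PySem.List.sorted xs (fun r => !p r) false
      = xs.filter p ++ xs.filter (fun r => !p r) := by
  rw [PySem.List.sorted_eq_foldl_insertBy]
  simpa using pv_sort_fold p xs []

-- the counting fold counts the valid records
theorem pv_count_fold (xs : List (List (String × Bool))) (n : Int) :
    xs.foldl (fun n r => if pvGetValid r then n + 1 else n) n
      = n + ((xs.filter (fun r => pvGetValid r)).length : Int) := by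
  induction xs generalizing n with
  | nil => simp
  | cons x xs ih =>
    by_cases h : pvGetValid x = true <;> simp [List.foldl_cons, h, ih] <;> omega

-- ===== VERDICT (by name: the statement is the Claim_ definition above) =====
theorem process_batch_records_spec : Claim_equal_process_batch_records := by
  intro records _
  unfold Spec_process_batch_records process_batch_records process_batch_records_alt
  rw [pv_fold_partition, pv_sorted_partition (fun r => pvGetValid r) records,
      pv_count_fold records 0]
  simp only [zero_add, List.nil_append, PySem.List.slice_to_natCast,
    PySem.List.slice_from_natCast, List.take_left, List.drop_left]
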